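-- pv_equiv track=rewrite | github.com/minhao920201/Sports-data-analysis-and-Programming | practice/week14.py | GetPlayerRecord
-- ===== SOURCE A (Python) =====
-- def GetPlayerRecord(fields, year_data):
--     player_data = {}
--     for p in year_data:
--         name = p['NAME']
--         if name not in player_data:
--             player_data[name] = {}
--             for field in fields[2:]:
--                 player_data[name][field] = []
--         for field in fields[2:]:
--             player_data[name][field].append(p[field])
--     return player_data
-- ===== SOURCE B (Python) =====
-- def GetPlayerRecord(fields, year_data):
--     # Phase 1: group the full records by name, first-appearance order.
--     groups = {}
--     for p in year_data:
--         groups.setdefault(p['NAME'], []).append(p)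
--     # Phase 2: transpose each group into per-field value lists.
--     return {name: {field: [p[field] for p in recs] for field in fields[2:]}
--             for name, recs in groups.items()}
-- ===== Notes on version B (the rewrite author's own statement) =====
-- stated objective: alternative
-- what changed: Replaces A's interleaved init-and-append single pass with a two-phase group-then-transpose: one pass collects whole records per name (setdefault), then a dict comprehension transposes each group into per-field value lists.
import Mathlib
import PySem

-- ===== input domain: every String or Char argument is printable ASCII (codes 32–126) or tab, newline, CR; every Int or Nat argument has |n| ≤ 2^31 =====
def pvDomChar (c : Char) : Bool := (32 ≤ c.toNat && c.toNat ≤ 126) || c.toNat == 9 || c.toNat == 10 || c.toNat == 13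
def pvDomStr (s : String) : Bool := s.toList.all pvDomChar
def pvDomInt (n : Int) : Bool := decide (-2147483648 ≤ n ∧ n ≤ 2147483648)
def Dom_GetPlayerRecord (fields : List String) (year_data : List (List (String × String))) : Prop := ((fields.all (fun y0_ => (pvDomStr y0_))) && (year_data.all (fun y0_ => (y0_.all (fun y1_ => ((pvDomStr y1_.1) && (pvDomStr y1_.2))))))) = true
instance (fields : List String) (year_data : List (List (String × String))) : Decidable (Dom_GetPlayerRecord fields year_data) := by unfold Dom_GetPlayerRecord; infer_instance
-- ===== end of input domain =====

-- B replaces A's interleaved init-and-append single pass by a group-then-transpose two-phase pass (objective: alternative decomposition, same cost).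

-- ===== PORT A =====
-- 'p[k]' is ported as ((PySem.Dict.ofList p).get? k).getD "" — the KeyError inputs (a record missing 'NAME'
-- or a field of fields[2:]) are excluded by Pre_, so the default is never taken on admitted inputs.
def GetPlayerRecord (fields : List String) (year_data : List (List (String × String))) : List (String × List (String × List String)) :=
  (year_data.foldl
    (fun player_data p =>
      let name := ((PySem.Dict.ofList p).get? "NAME").getD ""
      let player_data :=
        if !(player_data.contains name) then
          player_data.insert name
            ((PySem.List.slice fields (some 2)).foldl
              (fun inner field => inner.insert field ([] : List String)) PySem.Dict.empty)
        else player_data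
      (PySem.List.slice fields (some 2)).foldl
        (fun player_data field =>
          player_data.modify name PySem.Dict.empty
            (fun inner => inner.modify field [] (fun xs => xs ++ [((PySem.Dict.ofList p).get? field).getD ""])))
        player_data)
    PySem.Dict.empty).items.map (fun q => (q.1, q.2.items))

-- ===== PORT B =====
-- 'groups.setdefault(p["NAME"], []).append(p)' (in-place append to the list held by the dict) is ported as
-- setdefault followed by modify at the same key — exact for Python's aliasing here.
def GetPlayerRecord_alt (fields : List String) (year_data : List (List (String × String))) : List (String × List (String × List String)) :=
  (year_data.foldl
    (fun groups p =>
      let name := ((PySem.Dict.ofList p).get? "NAME").getD ""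
      (groups.setdefault name ([] : List (List (String × String)))).modify name [] (fun rs => rs ++ [p]))
    PySem.Dict.empty).items.map (fun q =>
    (q.1,
      ((PySem.List.slice fields (some 2)).foldl
        (fun inner field => inner.insert field (q.2.map (fun p => ((PySem.Dict.ofList p).get? field).getD "")))
        PySem.Dict.empty).items))

-- ===== PRECONDITION & SPEC =====
-- Pre_ excludes (i) inputs on which A raises KeyError: a record missing the 'NAME' key or missing a key listed
-- in fields[2:]; and (ii) duplicate entries in fields[2:] — a duplicate-key corner on which A's repeated
-- append stores each value once per occurrence while B's dict comprehension keeps one list per field.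
def Pre_GetPlayerRecord (fields : List String) (year_data : List (List (String × String))) : Prop :=
  (PySem.List.slice fields (some 2)).Nodup ∧
  ∀ p ∈ year_data, "NAME" ∈ p.map Prod.fst ∧ ∀ f ∈ PySem.List.slice fields (some 2), f ∈ p.map Prod.fst
instance (fields : List String) (year_data : List (List (String × String))) : Decidable (Pre_GetPlayerRecord fields year_data) := by unfold Pre_GetPlayerRecord; infer_instance

def pvWitness_GetPlayerRecord : List String × (List (List (String × String))) :=
  (["RK", "YEAR", "NAME", "PTS"],
   [[("NAME", "al"), ("PTS", "3")], [("NAME", "bo"), ("PTS", "4")], [("NAME", "al"), ("PTS", "5")]])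

def Spec_GetPlayerRecord (fields : List String) (year_data : List (List (String × String))) (out : List (String × List (String × List String))) : Prop := out = GetPlayerRecord_alt fields year_data
instance (fields : List String) (year_data : List (List (String × String))) (out : List (String × List (String × List String))) : Decidable (Spec_GetPlayerRecord fields year_data out) := by unfold Spec_GetPlayerRecord; infer_instance

-- ===== CLAIM (what is proved, stated in full; the proofs are below) =====
def Claim_equal_GetPlayerRecord : Prop := ∀ (fields : List String) (year_data : List (List (String × String))), Dom_GetPlayerRecord fields year_data → Pre_GetPlayerRecord fields year_data → Spec_GetPlayerRecord fields year_data (GetPlayerRecord fields year_data)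

-- ===== LEMMAS AND PROOFS =====

-- the value a record yields for a field ("" only outside Pre_)
def pvVal (p : List (String × String)) (f : String) : String :=
  ((PySem.Dict.ofList p).get? f).getD ""

-- the inner dict B builds for a group of records (and A's init loop, for recs = [])
def pvBI (F : List String) (recs : List (List (String × String))) : PySem.Dict String (List String) :=
  F.foldl (fun inner f => inner.insert f (recs.map (fun p => pvVal p f))) PySem.Dict.empty

-- A's state, expressed from B's grouping state: each group rendered through pvBI
def pvRend (F : List String) (g : PySem.Dict String (List (List (String × String)))) : PySem.Dict String (PySem.Dict String (List String)) :=
  ⟨g.items.map (fun q => (q.1, pvBI F q.2))⟩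

theorem pv_contains_rend (F : List String) (g : PySem.Dict String (List (List (String × String)))) (n : String) :
    (pvRend F g).contains n = g.contains n := by
  simp [pvRend, PySem.Dict.contains, List.any_map, Function.comp_def]

theorem pv_keys_rend (F : List String) (g : PySem.Dict String (List (List (String × String)))) :
    (pvRend F g).keys = g.keys := by
  simp [pvRend, PySem.Dict.keys]

theorem pv_get?_rend (F : List String) (g : PySem.Dict String (List (List (String × String)))) (n : String) :
    (pvRend F g).get? n = (g.get? n).map (pvBI F) := by
  simp [pvRend, PySem.Dict.get?, List.find?_map, Function.comp_def, Option.map_map]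

theorem pv_insert_get?_self {κ ν : Type} [BEq κ] [LawfulBEq κ] (d : PySem.Dict κ ν) (k : κ) (v : ν)
    (hnd : d.keys.Nodup) (h : d.get? k = some v) : d.insert k v = d := by
  have hc : d.contains k = true := by
    rw [PySem.Dict.contains_eq_isSome_get?, h]; rfl
  apply PySem.Dict.ext
  rw [PySem.Dict.items_insert_of_contains d v hc]
  have hmem : (k, v) ∈ d.items := PySem.Dict.mem_items_of_get?_eq_some _ h
  conv_rhs => rw [← List.map_id d.items]
  apply List.map_congr_left
  intro q hq
  by_cases hk : q.1 = k
  · have : (k, v) = q :=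
      List.inj_on_of_nodup_map (f := Prod.fst) (by simpa [PySem.Dict.keys] using hnd) hmem hq hk.symm
    simp [← this]
  · simp [hk]

theorem pv_modify_modify_self {κ ν : Type} [BEq κ] [LawfulBEq κ] (d : PySem.Dict κ ν) (k : κ) (d0 : ν)
    (f g : ν → ν) : (d.modify k d0 f).modify k d0 g = d.modify k d0 (fun v => g (f v)) := by
  simp [PySem.Dict.modify, PySem.Dict.getD_insert_self, PySem.Dict.insert_insert_self]

theorem pv_nodup_keys_modify {κ ν : Type} [BEq κ] [LawfulBEq κ] (d : PySem.Dict κ ν) (k : κ) (d0 : ν)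
    (f : ν → ν) (hnd : d.keys.Nodup) : (d.modify k d0 f).keys.Nodup := by
  rw [PySem.Dict.modify]
  exact PySem.Dict.nodup_keys_insert _ _ _ hnd

theorem pv_nodup_keys_setdefault (g : PySem.Dict String (List (List (String × String)))) (name : String)
    (hnd : g.keys.Nodup) : (g.setdefault name ([] : List (List (String × String)))).keys.Nodup := by
  rw [PySem.Dict.keys_setdefault]
  cases hc : g.contains name with
  | true => simpa using hnd
  | false =>
    rw [if_neg (by simp)]
    have hmem : name ∉ g.keys := by
      rw [PySem.Dict.contains_eq_decide_mem_keys] at hc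
      simpa using hc
    exact List.Nodup.append hnd (List.nodup_singleton _) (List.disjoint_singleton.mpr hmem)

theorem pv_foldl_modify_same {κ ν α : Type} [BEq κ] [LawfulBEq κ] (F : List α) (k : κ) (d0 : ν)
    (G : α → ν → ν) : ∀ (d : PySem.Dict κ ν), d.contains k = true → d.keys.Nodup →
    F.foldl (fun d f => d.modify k d0 (G f)) d = d.modify k d0 (fun v => F.foldl (fun v f => G f v) v) := by
  induction F with
  | nil =>
    intro d hc hnd
    obtain ⟨v, hv⟩ : ∃ v, d.get? k = some v := by
      rw [PySem.Dict.contains_eq_isSome_get?] at hc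
      exact Option.isSome_iff_exists.mp hc
    simp only [List.foldl_nil, PySem.Dict.modify, PySem.Dict.getD_of_get?_eq_some _ _ hv]
    exact (pv_insert_get?_self d k v hnd hv).symm
  | cons f F ih =>
    intro d hc hnd
    rw [List.foldl_cons, ih _ (by simp [PySem.Dict.contains_modify]) (pv_nodup_keys_modify _ _ _ _ hnd),
      pv_modify_modify_self]
    simp [List.foldl_cons]

theorem pv_modify_items_of_get? {κ ν : Type} [BEq κ] [LawfulBEq κ] (d : PySem.Dict κ ν) (k : κ) (d0 : ν)
    (f : ν → ν) (v : ν) (h : d.get? k = some v) :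
    (d.modify k d0 f).items = d.items.map (fun q => if q.1 == k then (k, f v) else q) := by
  have hc : d.contains k = true := by rw [PySem.Dict.contains_eq_isSome_get?, h]; rfl
  rw [PySem.Dict.modify, PySem.Dict.getD_of_get?_eq_some _ _ h,
    PySem.Dict.items_insert_of_contains _ _ hc]

theorem pv_items_bI (F : List String) (recs : List (List (String × String))) (hF : F.Nodup) :
    (pvBI F recs).items = F.map (fun f => (f, recs.map (fun p => pvVal p f))) := by
  have := PySem.Dict.items_foldl_insert_fresh (l := F) (k := id)
    (v := fun f => recs.map (fun p => pvVal p f)) (d := PySem.Dict.empty)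
    (by intro a _; simp [PySem.Dict.contains_empty]) (by simpa using hF)
  simpa [pvBI] using this

theorem pv_inner_loop (G : String → List String → List String) (F : List String) :
    ∀ (pre : List (String × List String)) (w : String → List String),
    ((pre.map Prod.fst) ++ F).Nodup →
    ((F.foldl (fun d f => d.modify f ([] : List String) (G f)) ⟨pre ++ F.map (fun f => (f, w f))⟩ :
        PySem.Dict String (List String))).items = pre ++ F.map (fun f => (f, G f (w f))) := by
  induction F with
  | nil => intro pre w _; simp
  | cons f F ih =>
    intro pre w hnd
    obtain ⟨hpre, hfF, hdisj⟩ := List.nodup_append.mp hnd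
    have hfpre : f ∉ pre.map Prod.fst := fun h => hdisj _ h f (by simp) rfl
    have hfF' : f ∉ F := (List.nodup_cons.mp hfF).1
    -- the first modify hits exactly the head of the F-part
    have hget : (⟨pre ++ (f :: F).map (fun f' => (f', w f'))⟩ :
        PySem.Dict String (List String)).get? f = some (w f) := by
      simp only [PySem.Dict.get?, List.find?_append]
      have h1 : List.find? (fun q => q.1 == f) pre = none := by
        apply List.find?_eq_none.mpr
        intro q hq hq1
        exact hfpre ((beq_iff_eq.mp hq1) ▸ List.mem_map_of_mem hq)
      rw [h1]
      simp
    have hstep : ((⟨pre ++ (f :: F).map (fun f' => (f', w f'))⟩ :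
        PySem.Dict String (List String)).modify f [] (G f)) =
        ⟨(pre ++ [(f, G f (w f))]) ++ F.map (fun f' => (f', w f'))⟩ := by
      apply PySem.Dict.ext
      rw [pv_modify_items_of_get? _ _ _ _ _ hget]
      simp only [List.map_cons, List.map_append]
      rw [List.append_assoc, List.singleton_append]
      congr 1
      · conv_rhs => rw [← List.map_id pre]
        apply List.map_congr_left
        intro q hq
        have : q.1 ≠ f := fun h => hfpre (h ▸ List.mem_map_of_mem hq)
        simp [this]
      · simp only [beq_self_eq_true, if_pos]
        congr 1
        rw [List.map_map]
        apply List.map_congr_left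
        intro f' hf'
        have : f' ≠ f := fun h => hfF' (h ▸ hf')
        simp [this]
    rw [List.foldl_cons, hstep, ih (pre ++ [(f, G f (w f))]) w (by simpa using hnd)]
    simp

theorem pv_inner_step (F : List String) (p : List (String × String))
    (recs : List (List (String × String))) (hF : F.Nodup) :
    F.foldl (fun inner f => inner.modify f [] (fun xs => xs ++ [pvVal p f])) (pvBI F recs)
      = pvBI F (recs ++ [p]) := by
  have h1 : pvBI F recs = ⟨F.map (fun f => (f, recs.map (fun p => pvVal p f)))⟩ :=
    PySem.Dict.ext (pv_items_bI F recs hF)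
  rw [h1]
  apply PySem.Dict.ext
  have := pv_inner_loop (fun f xs => xs ++ [pvVal p f]) F [] (fun f => recs.map (fun p => pvVal p f))
    (by simpa using hF)
  simp only [List.nil_append] at this
  rw [this, pv_items_bI F (recs ++ [p]) hF]
  simp

-- one loop iteration of A, on a rendered state, equals the rendering of one iteration of B
theorem pv_stepA_rend (F : List String) (g : PySem.Dict String (List (List (String × String))))
    (p : List (String × String)) (hF : F.Nodup) (hnd : g.keys.Nodup) :
    (let name := ((PySem.Dict.ofList p).get? "NAME").getD ""
     let player_data :=
       if !((pvRend F g).contains name) then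
         (pvRend F g).insert name
           (F.foldl (fun inner field => inner.insert field ([] : List String)) PySem.Dict.empty)
       else pvRend F g
     F.foldl
       (fun player_data field =>
         player_data.modify name PySem.Dict.empty
           (fun inner => inner.modify field [] (fun xs => xs ++ [((PySem.Dict.ofList p).get? field).getD ""])))
       player_data)
    = pvRend F (let name := ((PySem.Dict.ofList p).get? "NAME").getD ""
        (g.setdefault name ([] : List (List (String × String)))).modify name [] (fun rs => rs ++ [p])) := by
  show (F.foldl
      (fun player_data field =>
        player_data.modify (((PySem.Dict.ofList p).get? "NAME").getD "") PySem.Dict.empty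
          (fun inner => inner.modify field [] (fun xs => xs ++ [((PySem.Dict.ofList p).get? field).getD ""])))
      (if !((pvRend F g).contains (((PySem.Dict.ofList p).get? "NAME").getD "")) then
        (pvRend F g).insert (((PySem.Dict.ofList p).get? "NAME").getD "")
          (F.foldl (fun inner field => inner.insert field ([] : List String)) PySem.Dict.empty)
      else pvRend F g))
    = pvRend F ((g.setdefault (((PySem.Dict.ofList p).get? "NAME").getD "") ([] : List (List (String × String)))).modify
        (((PySem.Dict.ofList p).get? "NAME").getD "") [] (fun rs => rs ++ [p]))
  set name := ((PySem.Dict.ofList p).get? "NAME").getD "" with hname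
  set g1 := g.setdefault name ([] : List (List (String × String))) with hg1
  have hg1c : g1.contains name = true := by
    simp [hg1, PySem.Dict.contains_setdefault]
  have hg1nd : g1.keys.Nodup := pv_nodup_keys_setdefault g name hnd
  have hg1get : g1.get? name = some ((g.get? name).getD []) :=
    PySem.Dict.get?_setdefault_self g name []
  -- the init branch turns pvRend F g into pvRend F g1
  have hinit : (if !((pvRend F g).contains name) then
        (pvRend F g).insert name
          (F.foldl (fun inner field => inner.insert field ([] : List String)) PySem.Dict.empty)
      else pvRend F g) = pvRend F g1 := by
    rw [pv_contains_rend]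
    cases hc : g.contains name with
    | true => simp [hg1, PySem.Dict.setdefault_of_contains _ _ hc]
    | false =>
      simp only [Bool.not_false, if_pos]
      have hemp : (F.foldl (fun inner field => inner.insert field ([] : List String)) PySem.Dict.empty)
          = pvBI F [] := rfl
      rw [hemp]
      apply PySem.Dict.ext
      rw [PySem.Dict.items_insert_of_not_contains _ _ (by rw [pv_contains_rend]; exact hc)]
      rw [hg1, PySem.Dict.setdefault_of_not_contains _ _ hc]
      simp [pvRend, PySem.Dict.items_insert_of_not_contains _ _ hc]
  rw [hinit]
  -- the append loop on the rendered state
  rw [pv_foldl_modify_same F name PySem.Dict.empty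
    (fun field inner => inner.modify field [] (fun xs => xs ++ [((PySem.Dict.ofList p).get? field).getD ""]))
    (pvRend F g1) (by rw [pv_contains_rend]; exact hg1c) (by rw [pv_keys_rend]; exact hg1nd)]
  have hrget : (pvRend F g1).get? name = some (pvBI F ((g.get? name).getD [])) := by
    rw [pv_get?_rend, hg1get]; rfl
  apply PySem.Dict.ext
  rw [pv_modify_items_of_get? _ _ _ _ _ hrget]
  simp only [pvRend]
  rw [pv_modify_items_of_get? _ _ _ _ _ hg1get]
  have hloop : (F.foldl (fun v f => v.modify f [] (fun xs => xs ++ [((PySem.Dict.ofList p).get? f).getD ""]))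
      (pvBI F ((g.get? name).getD []))) = pvBI F (((g.get? name).getD []) ++ [p]) :=
    pv_inner_step F p ((g.get? name).getD []) hF
  rw [List.map_map, List.map_map]
  apply List.map_congr_left
  intro q hq
  by_cases hqk : q.1 = name
  · simp [hqk, hloop]
  · simp [hqk]

-- B's grouping loop keeps its keys unique
theorem pv_stepB_nodup (g : PySem.Dict String (List (List (String × String))))
    (p : List (String × String)) (hnd : g.keys.Nodup) :
    ((fun (groups : PySem.Dict String (List (List (String × String)))) (p : List (String × String)) =>
        let name := ((PySem.Dict.ofList p).get? "NAME").getD ""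
        (groups.setdefault name ([] : List (List (String × String)))).modify name [] (fun rs => rs ++ [p])) g p).keys.Nodup := by
  show ((g.setdefault (((PySem.Dict.ofList p).get? "NAME").getD "") ([] : List (List (String × String)))).modify
      (((PySem.Dict.ofList p).get? "NAME").getD "") [] (fun rs => rs ++ [p])).keys.Nodup
  apply pv_nodup_keys_modify
  exact pv_nodup_keys_setdefault g _ hnd

-- A's whole loop, started on a rendered state, renders B's whole loop
theorem pv_fold (F : List String) (l : List (List (String × String))) (hF : F.Nodup) :
    ∀ (g : PySem.Dict String (List (List (String × String)))), g.keys.Nodup →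
    l.foldl
      (fun player_data p =>
        let name := ((PySem.Dict.ofList p).get? "NAME").getD ""
        let player_data :=
          if !(player_data.contains name) then
            player_data.insert name
              (F.foldl (fun inner field => inner.insert field ([] : List String)) PySem.Dict.empty)
          else player_data
        F.foldl
          (fun player_data field =>
            player_data.modify name PySem.Dict.empty
              (fun inner => inner.modify field [] (fun xs => xs ++ [((PySem.Dict.ofList p).get? field).getD ""])))
          player_data) (pvRend F g)
    = pvRend F (l.foldl
        (fun groups p =>
          let name := ((PySem.Dict.ofList p).get? "NAME").getD ""
          (groups.setdefault name ([] : List (List (String × String)))).modify name [] (fun rs => rs ++ [p])) g) := by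
  induction l with
  | nil => intro g _; simp
  | cons p l ih =>
    intro g hnd
    rw [List.foldl_cons, List.foldl_cons, pv_stepA_rend F g p hF hnd,
      ih _ (pv_stepB_nodup g p hnd)]

-- ===== VERDICT (by name: the statement is the Claim_ definition above) =====
theorem GetPlayerRecord_spec : Claim_equal_GetPlayerRecord := by
  intro fields year_data _ hpre
  unfold Spec_GetPlayerRecord GetPlayerRecord GetPlayerRecord_alt
  have h := pv_fold (PySem.List.slice fields (some 2)) year_data hpre.1 PySem.Dict.empty (by simp)
  have hre : pvRend (PySem.List.slice fields (some 2)) PySem.Dict.empty = PySem.Dict.empty := rfl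
  rw [hre] at h
  rw [h]
  simp only [pvRend, List.map_map]
  apply List.map_congr_left
  intro q _
  simp [pvBI, pvVal]
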